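-- pv_equiv track=rewrite | github.com/HaViBo17/Parampariyam | head_node/core/methods.py | get_zeros
-- ===== SOURCE A (Python) =====
-- def get_zeros(hash):
--     count = 0
--     for i in range(len(hash)):
--         if hash[i] == '0':
--             count += 4
--         elif hash[i] ==  '1':
--             count += 3
--             return count
--         elif hash[i] in '23':
--             count += 2
--             return count
--         elif hash[i] in '4567':
--             count += 1
--             return count
--         else:
--             return count
--     return count
-- ===== SOURCE B (Python) =====
-- def get_zeros(hash):
--     p = len(hash) - len(hash.lstrip('0'))
--     count = 4 * p
--     if p == len(hash):
--         return count
--     c = hash[p]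
--     if c == '1':
--         count += 3
--     elif c in '23':
--         count += 2
--     elif c in '4567':
--         count += 1
--     return count
-- ===== Notes on version B (the rewrite author's own statement) =====
-- stated objective: simpler
-- what changed: Replaces the fused per-character accumulate loop with a prefix count of leading zero characters via lstrip (count = 4*p) plus one classification of the single next character.
import Mathlib
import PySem

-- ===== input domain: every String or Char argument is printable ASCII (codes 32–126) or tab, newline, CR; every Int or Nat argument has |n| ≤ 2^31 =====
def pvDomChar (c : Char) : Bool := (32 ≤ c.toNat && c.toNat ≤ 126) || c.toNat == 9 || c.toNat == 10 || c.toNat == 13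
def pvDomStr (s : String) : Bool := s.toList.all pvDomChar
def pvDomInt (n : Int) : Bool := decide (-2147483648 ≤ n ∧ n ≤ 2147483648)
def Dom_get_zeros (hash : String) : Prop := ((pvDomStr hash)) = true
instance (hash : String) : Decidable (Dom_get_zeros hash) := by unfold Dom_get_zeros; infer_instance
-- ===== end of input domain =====

-- B replaces the fused per-character accumulate loop with a leading-zero prefix count
-- (lstrip) followed by one classification of the next character: objective 'simpler'.


-- ===== PORT A =====
-- the for-loop over hash's characters with early returns, as structural recursion
def getZerosLoop : List Char → Int → Int
  | [], count => count
  | c :: rest, count =>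
    if c = '0' then getZerosLoop rest (count + 4)
    else if c = '1' then count + 3
    else if ("23".toList).contains c then count + 2        -- hash[i] in '23'
    else if ("4567".toList).contains c then count + 1      -- hash[i] in '4567'
    else count

def get_zeros (hash : String) : Int := getZerosLoop hash.toList 0

-- ===== PORT B =====
def get_zeros_alt (hash : String) : Int :=
  let cs := hash.toList
  let stripped := cs.dropWhile (· == '0')                  -- hash.lstrip('0')
  let p : Int := (cs.length : Int) - (stripped.length : Int)
  let count := 4 * p
  match stripped with
  | [] => count                                            -- p == len(hash)
  | c :: _ =>
    if c = '1' then count + 3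
    else if ("23".toList).contains c then count + 2
    else if ("4567".toList).contains c then count + 1
    else count

-- ===== PRECONDITION & SPEC =====
def Spec_get_zeros (hash : String) (out : Int) : Prop := out = get_zeros_alt hash
instance (hash : String) (out : Int) : Decidable (Spec_get_zeros hash out) := by unfold Spec_get_zeros; infer_instance

-- ===== CLAIM (what is proved, stated in full; the proofs are below) =====
def Claim_equal_get_zeros : Prop := ∀ (hash : String), Dom_get_zeros hash → Spec_get_zeros hash (get_zeros hash)

-- ===== LEMMAS AND PROOFS =====

-- A's loop, started at any accumulator, equals the accumulator plus B's value on the tail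
theorem getZerosLoop_eq (cs : List Char) (count : Int) :
    getZerosLoop cs count =
      count + 4 * ((cs.length : Int) - ((cs.dropWhile (· == '0')).length : Int)) +
      (match cs.dropWhile (· == '0') with
       | [] => 0
       | c :: _ =>
         if c = '1' then 3
         else if ("23".toList).contains c then 2
         else if ("4567".toList).contains c then 1
         else 0) := by
  induction cs generalizing count with
  | nil => simp [getZerosLoop]
  | cons c rest ih =>
    by_cases h0 : c = '0'
    · simp [getZerosLoop, h0, List.dropWhile, ih]; ring
    · have hc : (c == '0') = false := by simp [h0]
      simp [getZerosLoop, h0, List.dropWhile, hc]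
      split_ifs <;> ring

-- ===== VERDICT (by name: the statement is the Claim_ definition above) =====
theorem get_zeros_spec : Claim_equal_get_zeros := by
  intro hash _
  unfold Spec_get_zeros get_zeros get_zeros_alt
  rw [getZerosLoop_eq]
  cases h : hash.toList.dropWhile (· == '0') with
  | nil => simp [h]
  | cons c rest => simp [h]; split_ifs <;> ring
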